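-- pv_equiv track=rewrite | github.com/psychicesp/cell_flow | src/data_extraction/column_parse.py | _match_channels_to_columns
-- ===== SOURCE A (Python) =====
-- def _match_channels_to_columns(
--         column_names: list,
--         wanted_column_names: list
-- ) -> dict:
--     renamer = {}
--     column_names = sorted(column_names, key = len, reverse=True)
--     for column in column_names:
--         matches = [x for x in wanted_column_names if column[:len(x)] == x]
--         if len(matches) == 1:
--             renamer[column] = matches[0]
--     return renamer
-- ===== SOURCE B (Python) =====
-- def _match_channels_to_columns(
--         column_names: list,
--         wanted_column_names: list
-- ) -> dict:
--     # Count wanted names once, then walk each column's prefixes and look them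
--     # up: the inner scan over wanted_column_names disappears.
--     counts = {}
--     for name in wanted_column_names:
--         counts[name] = counts.get(name, 0) + 1
--     renamer = {}
--     for column in sorted(column_names, key=len, reverse=True):
--         total = 0
--         match = None
--         for k in range(len(column) + 1):
--             c = counts.get(column[:k], 0)
--             if c > 0:
--                 total += c
--                 match = column[:k]
--         if total == 1:
--             renamer[column] = match
--     return renamer
-- ===== Notes on version B (the rewrite author's own statement) =====
-- stated objective: faster
-- what changed: Instead of scanning all wanted names per column, B builds a count dict of wanted names once and, for each column, sums the counts of the column's own prefixes, making per-column work independent of the number of wanted names.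
import Mathlib
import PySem

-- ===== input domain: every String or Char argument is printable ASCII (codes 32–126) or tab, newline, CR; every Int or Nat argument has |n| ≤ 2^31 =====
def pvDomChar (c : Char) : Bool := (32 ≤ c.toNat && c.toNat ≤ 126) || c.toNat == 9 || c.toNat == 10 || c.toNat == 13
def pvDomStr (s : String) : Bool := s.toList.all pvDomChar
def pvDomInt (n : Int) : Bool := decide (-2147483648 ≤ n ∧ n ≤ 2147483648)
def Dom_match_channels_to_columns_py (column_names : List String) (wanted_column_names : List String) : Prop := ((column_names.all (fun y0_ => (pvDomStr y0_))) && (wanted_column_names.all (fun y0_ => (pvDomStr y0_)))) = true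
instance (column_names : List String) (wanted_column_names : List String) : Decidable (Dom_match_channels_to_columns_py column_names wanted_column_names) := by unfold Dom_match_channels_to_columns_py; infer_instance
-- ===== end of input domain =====

-- B replaces A's per-column scan over all wanted names by a count dict of the
-- wanted names built once plus a walk over each column's own prefixes (faster
-- in a timing run when the wanted list is large).

-- ===== PORT A =====
def match_channels_to_columns_py (column_names : List String) (wanted_column_names : List String) : List (String × String) :=
  let cols := PySem.List.sorted column_names (fun s => PySem.Str.len s) true
  (cols.foldl
    (fun (renamer : PySem.Dict String String) column =>
      let matched := wanted_column_names.filter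
        (fun x => PySem.Str.slice column none (some (PySem.Str.len x)) == x)
      if matched.length == 1 then
        renamer.insert column (PySem.List.pyGetD matched 0 "")
      else renamer)
    PySem.Dict.empty).items

-- ===== PORT B =====
def match_channels_to_columns_py_alt (column_names : List String) (wanted_column_names : List String) : List (String × String) :=
  let counts := wanted_column_names.foldl
    (fun (d : PySem.Dict String Int) name => d.insert name (d.getD name 0 + 1))
    PySem.Dict.empty
  ((PySem.List.sorted column_names (fun s => PySem.Str.len s) true).foldl
    (fun (renamer : PySem.Dict String String) column =>
      let tm := (PySem.List.pyRange 0 (PySem.Str.len column + 1) 1).foldl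
        (fun (s : Int × Option String) k =>
          let c := counts.getD (PySem.Str.slice column none (some k)) 0
          if 0 < c then (s.1 + c, some (PySem.Str.slice column none (some k))) else s)
        ((0 : Int), (none : Option String))
      -- Python's `match` is None until set; total == 1 guarantees it was set, `.getD ""` realises Option → String
      if tm.1 == 1 then renamer.insert column (tm.2.getD "") else renamer)
    PySem.Dict.empty).items

-- ===== PRECONDITION & SPEC =====
def Spec_match_channels_to_columns_py (column_names : List String) (wanted_column_names : List String) (out : List (String × String)) : Prop := out = match_channels_to_columns_py_alt column_names wanted_column_names
instance (column_names : List String) (wanted_column_names : List String) (out : List (String × String)) : Decidable (Spec_match_channels_to_columns_py column_names wanted_column_names out) := by unfold Spec_match_channels_to_columns_py; infer_instance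

-- ===== CLAIM (what is proved, stated in full; the proofs are below) =====
def Claim_equal_match_channels_to_columns_py : Prop := ∀ (column_names : List String) (wanted_column_names : List String), Dom_match_channels_to_columns_py column_names wanted_column_names → Spec_match_channels_to_columns_py column_names wanted_column_names (match_channels_to_columns_py column_names wanted_column_names)

-- ===== LEMMAS AND PROOFS =====

-- the length-j prefix of a column (Python column[:j]), as a String
def preStr (c : List Char) (j : Nat) : String := String.ofList (c.take j)

-- B's running total of prefix counts after scanning prefixes 0..m-1
def sumCnt (w : List String) (c : List Char) : Nat → Int
  | 0 => 0
  | m+1 => sumCnt w c m + (w.count (preStr c m) : Int)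

-- B's `match` variable after scanning prefixes 0..m-1 (last prefix with positive count)
def lastM (w : List String) (c : List Char) : Nat → Option String
  | 0 => none
  | m+1 => if 0 < w.count (preStr c m) then some (preStr c m) else lastM w c m

lemma toList_preStr (c : List Char) (j : Nat) : (preStr c j).toList = c.take j :=
  String.toList_ofList

lemma slice_eq_preStr (c : String) (j : Nat) :
    PySem.Str.slice c none (some (j : Int)) = preStr c.toList j := by
  apply String.toList_inj.mp
  rw [PySem.Str.toList_slice, toList_preStr]
  simp [PySem.List.slice_to_natCast]

lemma preStr_inj (c : List Char) {i j : Nat} (hi : i ≤ c.length) (hj : j ≤ c.length)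
    (h : preStr c i = preStr c j) : i = j := by
  have := congrArg (fun s => s.toList.length) h
  simpa [toList_preStr, Nat.min_eq_left hi, Nat.min_eq_left hj] using this

-- A's prefix test, characterised by ∃ j
lemma apred_iff (c x : String) :
    ((PySem.Str.slice c none (some (PySem.Str.len x)) == x) = true) ↔
    ∃ j, j < c.toList.length + 1 ∧ preStr c.toList j = x := by
  have hlen : PySem.Str.len x = (x.toList.length : Int) := by
    simp [PySem.Str.len]
  rw [hlen, slice_eq_preStr, beq_iff_eq]
  constructor
  · intro h
    refine ⟨x.toList.length, ?_, h⟩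
    have := congrArg (fun s => s.toList.length) h
    simp only [toList_preStr, List.length_take] at this
    omega
  · rintro ⟨j, hj, rfl⟩
    have hlt : (preStr c.toList j).toList.length = j := by
      simp only [toList_preStr, List.length_take]
      omega
    rw [hlt]

lemma sum_indicator (c : List Char) (x : String) :
    ∀ m, m ≤ c.length + 1 →
      ((List.range m).map (fun j => if preStr c j = x then (1 : Int) else 0)).sum
        = if ∃ j, j < m ∧ preStr c j = x then 1 else 0 := by
  intro m
  induction m with
  | zero => intro _; simp
  | succ m ih =>
    intro hm
    rw [List.range_succ, List.map_append, List.sum_append, ih (by omega)]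
    simp only [List.map_cons, List.map_nil, List.sum_cons, List.sum_nil, add_zero]
    by_cases h : preStr c m = x
    · have hnone : ¬ ∃ j, j < m ∧ preStr c j = x := by
        rintro ⟨j, hj, hjx⟩
        have := preStr_inj c (i := j) (j := m) (by omega) (by omega) (hjx.trans h.symm)
        omega
      have hyes : ∃ j, j < m + 1 ∧ preStr c j = x := ⟨m, by omega, h⟩
      rw [if_neg hnone, if_pos hyes, if_pos h]
      norm_num
    · have hiff : (∃ j, j < m + 1 ∧ preStr c j = x) ↔ (∃ j, j < m ∧ preStr c j = x) := by
        constructor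
        · rintro ⟨j, hj, hjx⟩
          refine ⟨j, ?_, hjx⟩
          rcases Nat.lt_succ_iff_lt_or_eq.mp hj with h' | rfl
          · exact h'
          · exact absurd hjx h
        · rintro ⟨j, hj, hjx⟩; exact ⟨j, by omega, hjx⟩
      rw [if_neg h, add_zero]
      simp only [hiff]

lemma sum_counts (c : List Char) (m : Nat) (hm : m ≤ c.length + 1) :
    ∀ (w : List String),
      ((List.range m).map (fun j => (w.count (preStr c j) : Int))).sum
        = ((w.filter (fun x => decide (∃ j, j < m ∧ preStr c j = x))).length : Int) := by
  intro w
  induction w with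
  | nil => simp
  | cons x t ih =>
    have hcount : ∀ j : Nat, ((x :: t).count (preStr c j) : Int)
        = (t.count (preStr c j) : Int) + (if preStr c j = x then (1 : Int) else 0) := by
      intro j
      by_cases h : preStr c j = x
      · simp [h]
      · simp [h, Ne.symm h]
    calc ((List.range m).map (fun j => ((x :: t).count (preStr c j) : Int))).sum
        = ((List.range m).map (fun j => (t.count (preStr c j) : Int)
            + (if preStr c j = x then (1 : Int) else 0))).sum := by
          congr 1; exact List.map_congr_left (fun j _ => hcount j)
      _ = ((List.range m).map (fun j => (t.count (preStr c j) : Int))).sum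
            + ((List.range m).map (fun j => if preStr c j = x then (1 : Int) else 0)).sum := by
          rw [List.sum_map_add]
      _ = (((x :: t).filter (fun y => decide (∃ j, j < m ∧ preStr c j = y))).length : Int) := by
          rw [ih, sum_indicator c x m hm, List.filter_cons]
          by_cases h : ∃ j, j < m ∧ preStr c j = x <;> simp [h]

lemma fold_eval (w : List String) (c : String) (m : Nat) :
    List.foldl (fun (s : Int × Option String) (k : Int) =>
        let cc := (w.count (PySem.Str.slice c none (some k)) : Int)
        if 0 < cc then (s.1 + cc, some (PySem.Str.slice c none (some k))) else s)
      ((0 : Int), (none : Option String)) (PySem.List.pyRange 0 (m : Int) 1)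
    = (sumCnt w c.toList m, lastM w c.toList m) := by
  induction m with
  | zero =>
    rw [PySem.List.pyRange_one_eq_nil (by omega)]
    rfl
  | succ m ih =>
    have hsplit : PySem.List.pyRange 0 ((m + 1 : Nat) : Int) 1
        = PySem.List.pyRange 0 (m : Int) 1 ++ [(m : Int)] := by
      push_cast
      exact PySem.List.pyRange_one_succ_right (by omega)
    rw [hsplit, List.foldl_append, ih]
    simp only [List.foldl_cons, List.foldl_nil, slice_eq_preStr]
    by_cases h : 0 < w.count (preStr c.toList m)
    · have h' : (0 : Int) < (w.count (preStr c.toList m) : Int) := by exact_mod_cast h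
      rw [if_pos h']
      simp [sumCnt, lastM, h]
    · have h' : ¬ (0 : Int) < (w.count (preStr c.toList m) : Int) := by exact_mod_cast h
      have h0 : w.count (preStr c.toList m) = 0 := by omega
      rw [if_neg h']
      simp [sumCnt, lastM, h0]

lemma lastM_some (w : List String) (c : List Char) (x : String) :
    ∀ m, (∀ j, j < m → 0 < w.count (preStr c j) → preStr c j = x) →
      (∃ j, j < m ∧ 0 < w.count (preStr c j)) → lastM w c m = some x := by
  intro m
  induction m with
  | zero => rintro _ ⟨j, hj, _⟩; omega
  | succ m ih =>
    rintro hall ⟨j, hj, hcj⟩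
    by_cases h : 0 < w.count (preStr c m)
    · simp only [lastM, if_pos h]
      rw [hall m (by omega) h]
    · have hjm : j < m := by
        rcases Nat.lt_succ_iff_lt_or_eq.mp hj with h' | rfl
        · exact h'
        · exact absurd hcj h
      simp only [lastM, if_neg h]
      exact ih (fun j hj => hall j (by omega)) ⟨j, hjm, hcj⟩

-- per-column agreement of the two loop bodies
lemma col_step (w : List String) (acc : PySem.Dict String String) (col : String) :
    (let matched := w.filter (fun x => PySem.Str.slice col none (some (PySem.Str.len x)) == x)
     if matched.length == 1 then acc.insert col (PySem.List.pyGetD matched 0 "") else acc)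
    =
    (let tm := (PySem.List.pyRange 0 (PySem.Str.len col + 1) 1).foldl
        (fun (s : Int × Option String) k =>
          let c := (w.foldl (fun (d : PySem.Dict String Int) name => d.insert name (d.getD name 0 + 1))
              PySem.Dict.empty).getD (PySem.Str.slice col none (some k)) 0
          if 0 < c then (s.1 + c, some (PySem.Str.slice col none (some k))) else s)
        ((0 : Int), (none : Option String))
     if tm.1 == 1 then acc.insert col (tm.2.getD "") else acc) := by
  have hcnt : ∀ p : String,
      (w.foldl (fun (d : PySem.Dict String Int) name => d.insert name (d.getD name 0 + 1))
        PySem.Dict.empty).getD p 0 = (w.count p : Int) := by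
    intro p
    rw [PySem.Dict.getD_foldl_insert_add_one]
    simp [PySem.Dict.getD_empty]
  have hstep : (PySem.List.pyRange 0 (PySem.Str.len col + 1) 1).foldl
      (fun (s : Int × Option String) k =>
        let c := (w.foldl (fun (d : PySem.Dict String Int) name => d.insert name (d.getD name 0 + 1))
            PySem.Dict.empty).getD (PySem.Str.slice col none (some k)) 0
        if 0 < c then (s.1 + c, some (PySem.Str.slice col none (some k))) else s)
      ((0 : Int), (none : Option String))
      = (PySem.List.pyRange 0 (PySem.Str.len col + 1) 1).foldl
      (fun (s : Int × Option String) k =>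
        let cc := (w.count (PySem.Str.slice col none (some k)) : Int)
        if 0 < cc then (s.1 + cc, some (PySem.Str.slice col none (some k))) else s)
      ((0 : Int), (none : Option String)) := by
    apply PySem.List.foldl_congr_mem
    intro acc k _
    simp only [hcnt]
  set n := col.toList.length with hn
  have hbound : PySem.Str.len col + 1 = ((n + 1 : Nat) : Int) := by
    simp [PySem.Str.len, hn]
  rw [hstep, hbound, fold_eval w col (n + 1)]
  -- identify the filters
  have hfilter : w.filter (fun x => PySem.Str.slice col none (some (PySem.Str.len x)) == x)
      = w.filter (fun x => decide (∃ j, j < n + 1 ∧ preStr col.toList j = x)) := by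
    apply List.filter_congr
    intro x _
    by_cases hp : ∃ j, j < n + 1 ∧ preStr col.toList j = x
    · rw [(apred_iff col x).mpr hp, decide_eq_true hp]
    · cases hb : (PySem.Str.slice col none (some (PySem.Str.len x)) == x) with
      | false => rw [decide_eq_false hp]
      | true => exact absurd ((apred_iff col x).mp hb) hp
  have hrange : ∀ m, sumCnt w col.toList m
      = ((List.range m).map (fun j => (w.count (preStr col.toList j) : Int))).sum := by
    intro m
    induction m with
    | zero => simp [sumCnt]
    | succ m ih => rw [List.range_succ, List.map_append, List.sum_append, sumCnt, ih]; simp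
  have hsum : sumCnt w col.toList (n + 1)
      = ((w.filter (fun x => PySem.Str.slice col none (some (PySem.Str.len x)) == x)).length : Int) := by
    rw [hrange, sum_counts col.toList (n + 1) (by omega) w, ← hfilter]
  set F := w.filter (fun x => PySem.Str.slice col none (some (PySem.Str.len x)) == x) with hF
  by_cases h1 : F.length = 1
  · obtain ⟨x, hx⟩ := List.length_eq_one_iff.mp h1
    have hxF : x ∈ F := by simp [hx]
    have hxw : x ∈ w := (List.mem_filter.mp (hF ▸ hxF)).1
    have hxpred := (List.mem_filter.mp (hF ▸ hxF)).2
    obtain ⟨j0, hj0, hj0x⟩ := (apred_iff col x).mp hxpred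
    have hlast : lastM w col.toList (n + 1) = some x := by
      apply lastM_some
      · intro j hj hcj
        have hmem : preStr col.toList j ∈ w := List.count_pos_iff.mp hcj
        have hpred : (PySem.Str.slice col none (some (PySem.Str.len (preStr col.toList j)))
            == preStr col.toList j) = true := (apred_iff col _).mpr ⟨j, hj, rfl⟩
        have : preStr col.toList j ∈ F := hF ▸ List.mem_filter.mpr ⟨hmem, hpred⟩
        rw [hx] at this
        simpa using this
      · refine ⟨j0, hj0, ?_⟩
        rw [hj0x]
        exact List.count_pos_iff.mpr hxw
    have hget : PySem.List.pyGetD F 0 "" = x := by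
      rw [hx]; simp [PySem.List.pyGetD_zero_cons]
    simp only [hsum, hlast, hget, h1]
    norm_num
  · have hint : ¬ ((F.length : Int) = 1) := by exact_mod_cast h1
    simp only [hsum]
    simp [h1, hint]

-- ===== VERDICT (by name: the statement is the Claim_ definition above) =====
theorem match_channels_to_columns_py_spec : Claim_equal_match_channels_to_columns_py := by
  intro column_names wanted_column_names _
  unfold Spec_match_channels_to_columns_py
  simp only [match_channels_to_columns_py, match_channels_to_columns_py_alt]
  congr 1
  apply PySem.List.foldl_congr_mem
  intro acc col _
  exact col_step wanted_column_names acc col
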